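-- pv_equiv track=rewrite | github.com/pypi-data/pypi-mirror-370 | packages/lexer-fdfattor-2025/lexer_fdfattor_2025-1.0.1.tar.gz/lexer_fdfattor_2025-1.0.1/lexer/core.py | afd_not
-- ===== SOURCE A (Python) =====
-- ESTADO_FINAL = "ESTADO FINAL"
--
-- ESTADO_NO_FINAL = "NO ACEPTADO"
--
-- ESTADO_TRAMPA = "EN ESTADO TRAMPA"
--
-- def afd_not(lexema):
--     estado = 0
--     estados_finales = [3]
--     for c in lexema:
--         if estado == 0 and c == 'n':
--             estado = 1
--         elif estado == 1 and c == 'o':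
--             estado = 2
--         elif estado == 2 and c == 't':
--             estado = 3
--         else:
--             estado = -1
--
--     if estado == -1:
--         return ESTADO_TRAMPA
--     if estado in estados_finales:
--         return ESTADO_FINAL
--     else:
--         return ESTADO_NO_FINAL
-- ===== SOURCE B (Python) =====
-- ESTADO_FINAL = "ESTADO FINAL"
--
-- ESTADO_NO_FINAL = "NO ACEPTADO"
--
-- ESTADO_TRAMPA = "EN ESTADO TRAMPA"
--
-- def afd_not(lexema):
--     if lexema == "not":
--         return ESTADO_FINAL
--     if "not".startswith(lexema):
--         return ESTADO_NO_FINAL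
--     return ESTADO_TRAMPA
-- ===== Notes on version B (the rewrite author's own statement) =====
-- stated objective: simpler
-- what changed: Replaces the character-by-character DFA state loop with a direct test: the accepted word itself is final, its proper prefixes are non-final, everything else is trapped.
import Mathlib
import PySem

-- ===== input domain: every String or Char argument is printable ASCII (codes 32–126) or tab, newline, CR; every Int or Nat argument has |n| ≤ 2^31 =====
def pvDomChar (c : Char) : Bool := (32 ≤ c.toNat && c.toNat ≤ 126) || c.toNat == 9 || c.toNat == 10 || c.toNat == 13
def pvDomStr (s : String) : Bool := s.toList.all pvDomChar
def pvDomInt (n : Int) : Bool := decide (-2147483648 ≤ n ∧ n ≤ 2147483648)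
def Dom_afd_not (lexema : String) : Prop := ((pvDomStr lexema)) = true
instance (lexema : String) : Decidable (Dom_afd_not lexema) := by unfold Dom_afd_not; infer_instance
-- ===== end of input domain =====

-- B replaces the per-character DFA loop with a direct prefix test against "not" (simpler).

-- ===== PORT A =====
def afdStep (estado : Int) (c : Char) : Int :=
  if estado = 0 ∧ c = 'n' then 1
  else if estado = 1 ∧ c = 'o' then 2
  else if estado = 2 ∧ c = 't' then 3
  else -1

def afd_not (lexema : String) : String :=
  let estado := lexema.toList.foldl afdStep 0
  let estados_finales : List Int := [3]
  if estado = -1 then "EN ESTADO TRAMPA"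
  else if estado ∈ estados_finales then "ESTADO FINAL"
  else "NO ACEPTADO"

-- ===== PORT B =====
def afd_not_alt (lexema : String) : String :=
  if lexema == "not" then "ESTADO FINAL"
  else if PySem.Str.startswith "not" lexema then "NO ACEPTADO"
  else "EN ESTADO TRAMPA"

-- ===== PRECONDITION & SPEC =====
def Spec_afd_not (lexema : String) (out : String) : Prop := out = afd_not_alt lexema
instance (lexema : String) (out : String) : Decidable (Spec_afd_not lexema out) := by unfold Spec_afd_not; infer_instance

-- ===== CLAIM (what is proved, stated in full; the proofs are below) =====
def Claim_equal_afd_not : Prop := ∀ (lexema : String), Dom_afd_not lexema → Spec_afd_not lexema (afd_not lexema)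

-- ===== LEMMAS AND PROOFS =====

-- the trap state -1 is absorbing
theorem foldl_afdStep_trap (l : List Char) : l.foldl afdStep (-1) = -1 := by
  induction l with
  | nil => rfl
  | cons c rest ih => simpa [afdStep] using ih

-- characterization of A's loop
theorem foldl_afdStep_char (l : List Char) :
    l.foldl afdStep 0 =
      (if l = [] then 0 else if l = ['n'] then 1 else if l = ['n','o'] then 2
       else if l = ['n','o','t'] then 3 else -1) := by
  match l with
  | [] => rfl
  | [c] =>
    by_cases h : c = 'n' <;> simp [List.foldl, afdStep, h]
  | [c1, c2] =>
    by_cases h1 : c1 = 'n' <;> by_cases h2 : c2 = 'o' <;>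
      simp [List.foldl, afdStep, h1, h2]
  | [c1, c2, c3] =>
    by_cases h1 : c1 = 'n' <;> by_cases h2 : c2 = 'o' <;> by_cases h3 : c3 = 't' <;>
      simp [List.foldl, afdStep, h1, h2, h3]
  | c1 :: c2 :: c3 :: c4 :: rest =>
    by_cases h1 : c1 = 'n' <;> by_cases h2 : c2 = 'o' <;> by_cases h3 : c3 = 't' <;>
      simp [List.foldl, afdStep, h1, h2, h3, foldl_afdStep_trap]

theorem string_eq_iff_toList (s t : String) : s = t ↔ s.toList = t.toList := by
  constructor
  · intro h; rw [h]
  · intro h; exact String.ext (by simpa [String.toList] using h)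

-- the prefixes of "not" are exactly the four lists A's loop distinguishes
theorem prefix_not_iff (l : List Char) :
    l <+: ['n','o','t'] ↔ (l = [] ∨ l = ['n'] ∨ l = ['n','o'] ∨ l = ['n','o','t']) := by
  match l with
  | [] => simp
  | [c1] => simp [List.cons_prefix_cons]
  | [c1, c2] => simp [List.cons_prefix_cons]
  | [c1, c2, c3] => simp [List.cons_prefix_cons]
  | c1 :: c2 :: c3 :: c4 :: rest => simp [List.cons_prefix_cons]

-- ===== VERDICT (by name: the statement is the Claim_ definition above) =====
theorem afd_not_spec : Claim_equal_afd_not := by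
  intro lexema _
  unfold Spec_afd_not afd_not afd_not_alt
  rw [foldl_afdStep_char]
  have heq : lexema = "not" ↔ lexema.toList = ['n','o','t'] := by
    rw [string_eq_iff_toList, show ("not".toList) = ['n','o','t'] from rfl]
  have hswc : PySem.Chars.startswith ['n','o','t'] lexema.toList = true ↔
      (lexema.toList = [] ∨ lexema.toList = ['n'] ∨ lexema.toList = ['n','o'] ∨
        lexema.toList = ['n','o','t']) := by
    rw [PySem.Chars.startswith_iff]
    exact prefix_not_iff lexema.toList
  by_cases h3 : lexema.toList = ['n','o','t']
  · have : lexema = "not" := heq.2 h3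
    subst this
    decide
  · have hne : lexema ≠ "not" := fun h => h3 (heq.1 h)
    by_cases h0 : lexema.toList = []
    · have hp : PySem.Chars.startswith ['n','o','t'] lexema.toList = true :=
        hswc.2 (Or.inl h0)
      rw [h0] at hp
      simp [h0, hne, hp]
    · by_cases h1 : lexema.toList = ['n']
      · have hp : PySem.Chars.startswith ['n','o','t'] lexema.toList = true :=
          hswc.2 (Or.inr (Or.inl h1))
        rw [h1] at hp
        simp [h1, hne, hp]
      · by_cases h2 : lexema.toList = ['n','o']
        · have hp : PySem.Chars.startswith ['n','o','t'] lexema.toList = true :=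
            hswc.2 (Or.inr (Or.inr (Or.inl h2)))
          rw [h2] at hp
          simp [h2, hne, hp]
        · have hp : PySem.Chars.startswith ['n','o','t'] lexema.toList = false := by
            cases hb : PySem.Chars.startswith ['n','o','t'] lexema.toList with
            | false => rfl
            | true =>
              rcases hswc.1 hb with h | h | h | h
              · exact absurd h h0
              · exact absurd h h1
              · exact absurd h h2
              · exact absurd h h3
          simp [h0, h1, h2, h3, hne, hp]
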